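-- pv_equiv track=rewrite | github.com/fnicolasmedioli/yo-bot | actions/utilidades.py | mapear_entidades
-- ===== SOURCE A (Python) =====
-- def mapear_entidades(lista_entidades):
--     mapeo = {}
--
--     for item in lista_entidades:
--         if not (item["entity"] in mapeo) or mapeo[item["entity"]]["extractor"] == "DIETClassifier" and item["extractor"] == "RegexEntityExtractor":
--             mapeo[item["entity"]] = item
--
--     if "asignatura" in mapeo and mapeo["asignatura"]["extractor"] == "DIETClassifier":
--         del mapeo["asignatura"]
--
--     return mapeo
-- ===== SOURCE B (Python) =====
-- def mapear_entidades(lista_entidades):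
--     # group items by entity in first-encounter order, then reduce each group
--     grupos = {}
--     for item in lista_entidades:
--         grupos.setdefault(item["entity"], []).append(item)
--
--     mapeo = {}
--     for nombre, items in grupos.items():
--         elegido = items[0]
--         for cand in items[1:]:
--             if elegido["extractor"] == "DIETClassifier" and cand["extractor"] == "RegexEntityExtractor":
--                 elegido = cand
--         mapeo[nombre] = elegido
--
--     if "asignatura" in mapeo and mapeo["asignatura"]["extractor"] == "DIETClassifier":
--         del mapeo["asignatura"]
--
--     return mapeo
-- ===== Notes on version B (the rewrite author's own statement) =====
-- stated objective: alternative
-- what changed: B replaces A's single-pass conditional-overwrite dict build with a two-pass decomposition: first group the items by entity name in encounter order, then reduce each group to one item with the replace-only-while-current-is-DIETClassifier rule, before the same final asignatura deletion.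
import Mathlib
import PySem

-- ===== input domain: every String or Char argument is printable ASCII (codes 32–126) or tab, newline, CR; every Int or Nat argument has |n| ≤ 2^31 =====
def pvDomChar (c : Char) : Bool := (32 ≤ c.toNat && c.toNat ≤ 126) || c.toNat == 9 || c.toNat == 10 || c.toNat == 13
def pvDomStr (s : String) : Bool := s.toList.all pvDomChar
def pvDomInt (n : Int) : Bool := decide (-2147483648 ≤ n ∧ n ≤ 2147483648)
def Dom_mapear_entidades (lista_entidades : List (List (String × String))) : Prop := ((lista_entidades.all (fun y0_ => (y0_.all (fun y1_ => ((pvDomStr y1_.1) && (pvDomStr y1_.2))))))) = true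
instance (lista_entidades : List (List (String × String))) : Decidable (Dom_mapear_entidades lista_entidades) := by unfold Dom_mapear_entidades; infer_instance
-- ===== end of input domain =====

-- B rebuilds the map by grouping items per entity first and reducing each group; same values, an alternative decomposition (no speed claim).


-- ===== PORT A =====
-- item["key"] for an item dict (an association list): first match; Pre_ guarantees every lookup A's
-- run actually reaches finds its key, so the "" default is never reached on admitted inputs
-- (Python raises KeyError exactly where it would be reached).
def pvLook (item : List (String × String)) (k : String) : String :=
  ((PySem.Dict.mk item).get? k).getD ""

def mapear_entidades (lista_entidades : List (List (String × String))) : List (String × List (String × String)) :=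
  let mapeo : PySem.Dict String (List (String × String)) :=
    lista_entidades.foldl (fun mapeo item =>
      if !(mapeo.contains (pvLook item "entity")) ||
         (pvLook (mapeo.getD (pvLook item "entity") []) "extractor" == "DIETClassifier" &&
          pvLook item "extractor" == "RegexEntityExtractor")
      then mapeo.insert (pvLook item "entity") item
      else mapeo) PySem.Dict.empty
  if mapeo.contains "asignatura" && (pvLook (mapeo.getD "asignatura" []) "extractor" == "DIETClassifier")
  then (mapeo.erase "asignatura").items
  else mapeo.items

-- ===== PORT B =====
-- reduce one group: start from items[0] (groups are never empty, [] default unreachable) and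
-- replace only while the current choice's extractor is DIETClassifier and the candidate's is RegexEntityExtractor
def pvElegir (items : List (List (String × String))) : List (String × String) :=
  (items.drop 1).foldl (fun elegido cand =>
    if pvLook elegido "extractor" == "DIETClassifier" &&
       pvLook cand "extractor" == "RegexEntityExtractor"
    then cand else elegido) (items.headD [])

def mapear_entidades_alt (lista_entidades : List (List (String × String))) : List (String × List (String × String)) :=
  let grupos : PySem.Dict String (List (List (String × String))) :=
    lista_entidades.foldl (fun grupos item =>
      grupos.modify (pvLook item "entity") [] (· ++ [item])) PySem.Dict.empty
  let mapeo : PySem.Dict String (List (String × String)) :=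
    grupos.items.foldl (fun mapeo p => mapeo.insert p.1 (pvElegir p.2)) PySem.Dict.empty
  if mapeo.contains "asignatura" && (pvLook (mapeo.getD "asignatura" []) "extractor" == "DIETClassifier")
  then (mapeo.erase "asignatura").items
  else mapeo.items

-- ===== PRECONDITION & SPEC =====
-- default returned below for a key absent from an item dict: distinct from every name Pre_
-- compares lookups against, so an absent key never passes any of those comparisons
def pvAusente : String := "<ausente>"

def pvMira (item : List (String × String)) (k : String) : String :=
  ((PySem.Dict.mk item).get? k).getD pvAusente

-- closed-form value of A's running choice for a same-entity group: the first item, unless its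
-- extractor is "DIETClassifier", in which case the first later "RegexEntityExtractor" item (if any)
def pvChoice (P : List (List (String × String))) : List (String × String) :=
  match P with
  | [] => []
  | h :: t =>
      if pvMira h "extractor" == "DIETClassifier"
      then (t.find? (fun c => pvMira c "extractor" == "RegexEntityExtractor")).getD h
      else h

-- Pre_ admits exactly the inputs on which Python A returns: every item has the key "entity", and
-- every "extractor" lookup A's run reaches finds its key (the reached lookups are characterized in
-- closed form by pvChoice, the first-match value of the running choice); outside Pre_ A raises
-- KeyError — and B performs the same lookups, so it raises there too.
def Pre_mapear_entidades (lista_entidades : List (List (String × String))) : Prop :=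
  (∀ i, (h : i < lista_entidades.length) →
    (PySem.Dict.mk lista_entidades[i]).contains "entity" = true ∧
    (∀ _ : (lista_entidades.take i).filter
             (fun j => pvMira j "entity" == pvMira lista_entidades[i] "entity") ≠ [],
      (PySem.Dict.mk (pvChoice ((lista_entidades.take i).filter
          (fun j => pvMira j "entity" == pvMira lista_entidades[i] "entity")))).contains "extractor" = true ∧
      (pvMira (pvChoice ((lista_entidades.take i).filter
          (fun j => pvMira j "entity" == pvMira lista_entidades[i] "entity"))) "extractor" = "DIETClassifier" →
        (PySem.Dict.mk lista_entidades[i]).contains "extractor" = true)))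
  ∧ (lista_entidades.filter (fun j => pvMira j "entity" == "asignatura") ≠ [] →
      (PySem.Dict.mk (pvChoice (lista_entidades.filter
        (fun j => pvMira j "entity" == "asignatura")))).contains "extractor" = true)
instance (lista_entidades : List (List (String × String))) : Decidable (Pre_mapear_entidades lista_entidades) := by unfold Pre_mapear_entidades; infer_instance

def pvWitness_mapear_entidades : (List (List (String × String))) :=
  [[("entity", "materia"), ("extractor", "DIETClassifier")],
   [("entity", "materia"), ("extractor", "RegexEntityExtractor")]]

def Spec_mapear_entidades (lista_entidades : List (List (String × String))) (out : List (String × List (String × String))) : Prop := out = mapear_entidades_alt lista_entidades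
instance (lista_entidades : List (List (String × String))) (out : List (String × List (String × String))) : Decidable (Spec_mapear_entidades lista_entidades out) := by unfold Spec_mapear_entidades; infer_instance

-- ===== CLAIM (what is proved, stated in full; the proofs are below) =====
def Claim_equal_mapear_entidades : Prop := ∀ (lista_entidades : List (List (String × String))), Dom_mapear_entidades lista_entidades → Pre_mapear_entidades lista_entidades → Spec_mapear_entidades lista_entidades (mapear_entidades lista_entidades)

-- ===== LEMMAS AND PROOFS =====

-- the reduced view of a group dict: each group replaced by its chosen item
def pvMapD (g : PySem.Dict String (List (List (String × String)))) :
    PySem.Dict String (List (String × String)) :=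
  PySem.Dict.mk (g.items.map (fun p => (p.1, pvElegir p.2)))

theorem pvGet?_mapD (g : PySem.Dict String (List (List (String × String)))) (k : String) :
    (pvMapD g).get? k = (g.get? k).map pvElegir := by
  obtain ⟨l⟩ := g
  induction l with
  | nil => rfl
  | cons p t ih =>
    simp only [pvMapD, List.map_cons] at *
    rw [PySem.Dict.get?_mk_cons, PySem.Dict.get?_mk_cons]
    by_cases h : p.1 == k
    · simp [h]
    · simp only [h, Bool.false_eq_true, if_false] at *
      exact ih

theorem pvContains_mapD (g : PySem.Dict String (List (List (String × String)))) (k : String) :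
    (pvMapD g).contains k = g.contains k := by
  rw [PySem.Dict.contains_eq_isSome_get?, PySem.Dict.contains_eq_isSome_get?, pvGet?_mapD]
  cases g.get? k <;> rfl

theorem pvElegir_append (its : List (List (String × String))) (x : List (String × String))
    (h : its ≠ []) :
    pvElegir (its ++ [x]) =
      if pvLook (pvElegir its) "extractor" == "DIETClassifier" &&
         pvLook x "extractor" == "RegexEntityExtractor"
      then x else pvElegir its := by
  obtain ⟨a, t, rfl⟩ := List.exists_cons_of_ne_nil h
  simp [pvElegir, List.foldl_append]

theorem pvStep (g : PySem.Dict String (List (List (String × String))))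
    (item : List (String × String))
    (hn : g.keys.Nodup) (hne : ∀ p ∈ g.items, p.2 ≠ []) :
    (if !((pvMapD g).contains (pvLook item "entity")) ||
        (pvLook ((pvMapD g).getD (pvLook item "entity") []) "extractor" == "DIETClassifier" &&
         pvLook item "extractor" == "RegexEntityExtractor")
     then (pvMapD g).insert (pvLook item "entity") item
     else pvMapD g) =
    pvMapD (g.modify (pvLook item "entity") [] (· ++ [item])) := by
  set ent := pvLook item "entity" with hent
  rw [PySem.Dict.modify]
  by_cases hc : g.contains ent = true
  · have hsome : (g.get? ent).isSome = true := by rw [← PySem.Dict.contains_eq_isSome_get?]; exact hc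
    obtain ⟨its, hits⟩ := Option.isSome_iff_exists.mp hsome
    have hmem : (ent, its) ∈ g.items := PySem.Dict.mem_items_of_get?_eq_some (d := g) hits
    have hits_ne : its ≠ [] := hne _ hmem
    have hgd : g.getD ent [] = its := PySem.Dict.getD_of_get?_eq_some (d := g) (d0 := []) hits
    have hmc : (pvMapD g).contains ent = true := by rw [pvContains_mapD]; exact hc
    have hmg : (pvMapD g).getD ent [] = pvElegir its := by
      rw [PySem.Dict.getD_eq_get?_getD, pvGet?_mapD, hits]; rfl
    rw [hmc, hmg, hgd]
    by_cases hb : (pvLook (pvElegir its) "extractor" == "DIETClassifier" &&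
        pvLook item "extractor" == "RegexEntityExtractor") = true
    · simp only [hb, Bool.not_true, Bool.false_or, if_true]
      apply PySem.Dict.ext
      rw [PySem.Dict.items_insert_of_contains _ _ hmc,
          pvMapD, pvMapD, PySem.Dict.items_insert_of_contains _ _ hc]
      simp only [List.map_map]
      apply List.map_congr_left
      intro p hp
      by_cases he : p.1 == ent
      · simp [Function.comp, he, pvElegir_append its item hits_ne, hb]
      · simp [Function.comp, he]
    · simp only [hb, Bool.not_true, Bool.false_or]
      apply PySem.Dict.ext
      rw [pvMapD, pvMapD, PySem.Dict.items_insert_of_contains _ _ hc]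
      simp only [List.map_map]
      symm
      apply List.map_congr_left
      intro p hp
      by_cases he : p.1 == ent
      · have he' : p.1 = ent := by exact eq_of_beq he
        have : g.get? p.1 = some p.2 := PySem.Dict.get?_of_mem_items (d := g) (by simpa using hp) hn
        rw [he', hits] at this
        have hp2 : p.2 = its := by injection this.symm
        simp [Function.comp, pvElegir_append its item hits_ne, hb, he', hp2]
      · simp [Function.comp, he]
  · have hc' : g.contains ent = false := by simpa using hc
    have hmc : (pvMapD g).contains ent = false := by rw [pvContains_mapD]; exact hc'
    have hgd : g.getD ent [] = [] := PySem.Dict.getD_of_not_contains (d := g) (k := ent) [] hc'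
    rw [hmc, hgd]
    simp only [Bool.not_false, Bool.true_or, if_true]
    apply PySem.Dict.ext
    rw [PySem.Dict.items_insert_of_not_contains _ _ hmc,
        pvMapD, pvMapD, PySem.Dict.items_insert_of_not_contains _ _ hc']
    simp [pvElegir]

theorem pvLoop (L : List (List (String × String)))
    (g : PySem.Dict String (List (List (String × String))))
    (hn : g.keys.Nodup) (hne : ∀ p ∈ g.items, p.2 ≠ []) :
    L.foldl (fun mapeo item =>
      if !(mapeo.contains (pvLook item "entity")) ||
         (pvLook (mapeo.getD (pvLook item "entity") []) "extractor" == "DIETClassifier" &&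
          pvLook item "extractor" == "RegexEntityExtractor")
      then mapeo.insert (pvLook item "entity") item
      else mapeo) (pvMapD g) =
    pvMapD (L.foldl (fun grupos item =>
      grupos.modify (pvLook item "entity") [] (· ++ [item])) g) := by
  induction L generalizing g with
  | nil => rfl
  | cons item t ih =>
    simp only [List.foldl_cons]
    rw [pvStep g item hn hne]
    exact ih _ (PySem.Dict.nodup_keys_insert _ _ _ hn)
      (by
        intro p hp
        rw [PySem.Dict.modify] at hp
        rcases (PySem.Dict.mem_items_insert _ _ _ p).mp hp with h | h
        · subst h; simp
        · exact hne _ h.1)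

-- ===== VERDICT (by name: the statement is the Claim_ definition above) =====
theorem mapear_entidades_spec : Claim_equal_mapear_entidades := by
  intro L _ _
  unfold Spec_mapear_entidades mapear_entidades mapear_entidades_alt
  have hg : ∀ (grupos : PySem.Dict String (List (List (String × String)))),
      grupos.keys.Nodup →
      grupos.items.foldl (fun mapeo p => mapeo.insert p.1 (pvElegir p.2)) PySem.Dict.empty
        = pvMapD grupos := by
    intro grupos hnod
    apply PySem.Dict.ext
    rw [PySem.Dict.items_foldl_insert_fresh grupos.items (fun p => p.1) (fun p => pvElegir p.2)
        PySem.Dict.empty (fun a _ => PySem.Dict.contains_empty _) hnod]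
    rfl
  have hnod : (L.foldl (fun grupos item =>
      grupos.modify (pvLook item "entity") [] (· ++ [item])) PySem.Dict.empty).keys.Nodup := by
    apply PySem.Dict.nodup_keys_foldl_modify_key
    exact PySem.Dict.nodup_keys_empty
  have hA := pvLoop L PySem.Dict.empty PySem.Dict.nodup_keys_empty (by intro p hp; cases hp)
  have key := hA.trans (hg _ hnod).symm
  exact congrArg (fun m : PySem.Dict String (List (String × String)) =>
    if m.contains "asignatura" && (pvLook (m.getD "asignatura" []) "extractor" == "DIETClassifier")
    then (m.erase "asignatura").items else m.items) key
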